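-- pv_equiv track=rewrite | github.com/sonsohdezz/sonsohdezz_TFG_ori | lineage.py | fusion
-- ===== SOURCE A (Python) =====
-- def fusion(filo_dic):
--
-- 	# Creamos dos listas donde almacenaremos los ORFs (keys) y los linajes (values).
-- 	contig_ids_list = []
-- 	list_of_lineages = []
--
-- 	# Formateamos los nombres de las filas que corresponden a DISTINTOS ORFs de un MISMO contig, y les damos a todas el MISMO NOMBRE.
-- 	for ORF in filo_dic:
-- 		lineage = filo_dic[ORF]
-- 		contig_id = ORF[:-2]                      # Eliminamos los dos últimos carácteres del nombre (ej: FRAGMENTO_1_2 = FRAGMENTO_1).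
-- 		list_of_lineages.append(lineage)          # Almacenamos el linaje de cada ORF de un mismo contig a una misma lista.
-- 		contig_ids_list.append(contig_id)      	 # Añadimos los distintos nombres nuevos para cada ORF a una misma lista.
--
-- 	fusion_dic = {}                               # Creamos un nuevo diccionario.
--
-- 	# Creamos una función que devuelve las posisiciones de las filas con el mismo nombre (filas de los disintos ORFs de un MISMO contig).
-- 	def list_duplicates_of(seq,item):
-- 		start_at = -1
-- 		locs = []
-- 		while True:
-- 			try:
-- 				loc = seq.index(item,start_at+1)
-- 			except ValueError:
-- 				break
-- 			else:
-- 				locs.append(loc)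
-- 				start_at = loc
-- 		return locs
--
-- 	lineages_result_list = []                              # Creamos una nueva lista.
--
-- 	for contig in contig_ids_list:
-- 		indexes = list_duplicates_of(contig_ids_list, contig)     					# Almacenamos las posiciones de las filas con nombre de queries iguales.
-- 		lineages_result_list = [list_of_lineages[i] for i in indexes]       # Extraemos la lista de taxas de esas filas y la añadimos a una misma lista.
-- 		fusion_dic[contig] = lineages_result_list                         		# El diccionario tiene como values las listas de taxas de cada ORF de un contig.
--
-- 	return fusion_dic
-- ===== SOURCE B (Python) =====
-- def fusion(filo_dic):
--     # One pass: group lineages by contig id (ORF name minus its last two chars)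
--     # as we go, instead of re-scanning the whole key list for every ORF.
--     fusion_dic = {}
--     for orf, lineage in filo_dic.items():
--         contig = orf[:-2]
--         fusion_dic[contig] = fusion_dic.get(contig, []) + [lineage]
--     return fusion_dic
-- ===== Notes on version B (the rewrite author's own statement) =====
-- stated objective: faster
-- what changed: A scans the whole contig-id list with repeated list.index calls for every ORF (rebuilding each group from scratch each time); B builds the groups in a single pass with one dict, appending each lineage to its contig's list as it is seen.
import Mathlib
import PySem

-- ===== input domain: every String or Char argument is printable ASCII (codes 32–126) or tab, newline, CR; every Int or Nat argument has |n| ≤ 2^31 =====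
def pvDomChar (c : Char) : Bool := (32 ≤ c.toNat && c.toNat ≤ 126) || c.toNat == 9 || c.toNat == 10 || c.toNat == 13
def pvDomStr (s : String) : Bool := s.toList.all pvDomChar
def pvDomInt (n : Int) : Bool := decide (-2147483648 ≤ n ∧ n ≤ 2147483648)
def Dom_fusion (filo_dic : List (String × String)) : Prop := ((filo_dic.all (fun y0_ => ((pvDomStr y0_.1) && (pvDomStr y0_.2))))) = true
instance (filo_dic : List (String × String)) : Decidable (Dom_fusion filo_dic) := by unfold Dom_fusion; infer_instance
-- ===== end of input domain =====

-- B replaces A's quadratic rebuild-every-group-by-index-scans with a single grouping pass over the dict (return value only; neither version mutates its argument).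

-- ===== PORT A =====
-- ORF[:-2], shared text of both Pythons
def pvStrip (s : String) : String := PySem.Str.slice s none (some (-2))

-- the 'while True: seq.index(item, start_at+1)' loop; fuel = seq.length + 1 bounds its
-- iterations exactly (each found index is strictly larger than the last), so this is exact
def pvListDupLoop (seq : List String) (item : String) : Nat → Int → List Int → List Int
  | 0, _, locs => locs
  | f+1, startAt, locs =>
    match PySem.List.index? (PySem.List.slice seq (some (startAt+1)) none) item with
    | none => locs
    | some k => pvListDupLoop seq item f (startAt + 1 + k) (locs ++ [startAt + 1 + k])

def pvListDuplicatesOf (seq : List String) (item : String) : List Int :=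
  pvListDupLoop seq item (seq.length + 1) (-1) []

def fusion (filo_dic : List (String × String)) : List (String × List String) :=
  -- 'for ORF in filo_dic' iterates the dict's keys; filo_dic[ORF] cannot raise KeyError
  -- (the key comes from the dict itself), so the .getD "" default is never used
  let D := PySem.Dict.mk filo_dic
  let pair := (filo_dic.map (·.1)).foldl
      (fun (acc : List String × List String) ORF =>
        let lineage := (D.get? ORF).getD ""
        let contig_id := pvStrip ORF
        (acc.1 ++ [contig_id], acc.2 ++ [lineage])) ([], [])
  let contig_ids_list := pair.1
  let list_of_lineages := pair.2
  let fusion_dic := contig_ids_list.foldl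
      (fun d contig =>
        let indexes := pvListDuplicatesOf contig_ids_list contig
        -- list_of_lineages[i]: every index produced by the loop is in range, so .getD "" is exact
        let lineages_result_list := indexes.map (fun i => ((PySem.List.pyGet? list_of_lineages i).getD ""))
        d.insert contig lineages_result_list) PySem.Dict.empty
  fusion_dic.items

-- ===== PORT B =====
def fusion_alt (filo_dic : List (String × String)) : List (String × List String) :=
  (filo_dic.foldl
      (fun (d : PySem.Dict String (List String)) p =>
        d.modify (pvStrip p.1) [] (fun cur => cur ++ [p.2]))
      PySem.Dict.empty).items

-- ===== PRECONDITION & SPEC =====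
-- filo_dic is a Python dict: its association-list encoding never carries duplicate keys.
def Pre_fusion (filo_dic : List (String × String)) : Prop := (filo_dic.map Prod.fst).Nodup
instance (filo_dic : List (String × String)) : Decidable (Pre_fusion filo_dic) := by unfold Pre_fusion; infer_instance
def pvWitness_fusion : (List (String × String)) := [("A_1", "x"), ("A_2", "y"), ("B_1", "z")]
def Spec_fusion (filo_dic : List (String × String)) (out : List (String × List String)) : Prop := out = fusion_alt filo_dic
instance (filo_dic : List (String × String)) (out : List (String × List String)) : Decidable (Spec_fusion filo_dic out) := by unfold Spec_fusion; infer_instance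

-- ===== CLAIM (what is proved, stated in full; the proofs are below) =====
def Claim_equal_fusion : Prop := ∀ (filo_dic : List (String × String)), Dom_fusion filo_dic → Pre_fusion filo_dic → Spec_fusion filo_dic (fusion filo_dic)

-- ===== LEMMAS AND PROOFS =====

-- the group of contig c, in input order: the common value both programs give key c
def pvGroup (l : List (String × String)) (c : String) : List String :=
  (l.filter (fun p => p.1 == c)).map (·.2)

-- A's first loop produces the stripped keys and the values, in order
lemma foldA_pairs (D : PySem.Dict String String) (xs : List (String × String))
    (hx : ∀ p ∈ xs, D.get? p.1 = some p.2) (c0 l0 : List String) :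
    (xs.map (·.1)).foldl
        (fun (acc : List String × List String) ORF =>
          (acc.1 ++ [pvStrip ORF], acc.2 ++ [(D.get? ORF).getD ""])) (c0, l0)
      = (c0 ++ xs.map (fun p => pvStrip p.1), l0 ++ xs.map (·.2)) := by
  induction xs generalizing c0 l0 with
  | nil => simp
  | cons p t ih =>
    have hp : D.get? p.1 = some p.2 := hx p (by simp)
    simp only [List.map_cons, List.foldl_cons, hp, Option.getD_some]
    rw [ih (fun q hq => hx q (by simp [hq]))]
    simp

-- the index loop, mapped through list_of_lineages, is exactly the group of c
lemma listDup_map_get (l : List (String × String)) (c : String) (f : Nat) (s : Nat)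
    (hf : (((l.map (·.1)).drop s).count c) < f) (locs : List Int) :
    (pvListDupLoop (l.map (·.1)) c f ((s : Int) - 1) locs).map
        (fun i => ((PySem.List.pyGet? (l.map (·.2)) i).getD ""))
      = locs.map (fun i => ((PySem.List.pyGet? (l.map (·.2)) i).getD ""))
        ++ pvGroup (l.drop s) c := by
  induction f generalizing s locs with
  | zero => omega
  | succ f ih =>
    have hs : (s : Int) - 1 + 1 = ((s : Nat) : Int) := by omega
    rw [pvListDupLoop]
    rw [hs, PySem.List.slice_from_natCast]
    rcases hidx : PySem.List.index? ((l.map (·.1)).drop s) c with _ | k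
    · -- no further occurrence
      have hnc : c ∉ (l.map (·.1)).drop s := (PySem.List.index?_eq_none_iff _ _).mp hidx
      simp only [hidx]
      have : pvGroup (l.drop s) c = [] := by
        simp only [pvGroup, List.map_eq_nil_iff, List.filter_eq_nil_iff]
        intro p hp
        simp only [beq_iff_eq]
        intro hpc
        exact hnc (by rw [← List.map_drop]; exact List.mem_map.mpr ⟨p, hp, hpc⟩)
      simp [this]
    · simp only [hidx]
      obtain ⟨hk, h1, h2⟩ := PySem.List.getElem_of_index?_eq_some hidx
      have hlen : s + k < l.length := by
        have := hk; simp [List.length_drop] at this; omega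
      -- facts about l[s+k]
      have h1' : (l[s + k]'hlen).1 = c := by
        have : ((l.map (·.1)).drop s)[k] = l[s+k].1 := by
          rw [List.getElem_drop, List.getElem_map]
        rw [this] at h1; exact h1
      have h2' : ∀ j (hj : j < k), (l[s + j]'(by omega)).1 ≠ c := by
        intro j hj
        have := h2 j hj
        rw [List.getElem_drop, List.getElem_map] at this
        exact this
      -- count decomposition
      have hmlen : s + k < (l.map (·.1)).length := by simpa using hlen
      have htk : c ∉ ((l.map (·.1)).drop s).take k := by
        intro hmem
        obtain ⟨i, hi, hie⟩ := List.mem_iff_getElem.mp hmem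
        have hik : i < k := by simp [List.length_take] at hi; omega
        rw [List.getElem_take] at hie
        exact h2 i hik hie
      have hsplit : (l.map (·.1)).drop s
          = ((l.map (·.1)).drop s).take k ++ (c :: (l.map (·.1)).drop (s+k+1)) := by
        conv_lhs => rw [← List.take_append_drop k ((l.map (·.1)).drop s)]
        congr 1
        rw [List.drop_drop, ← List.getElem_cons_drop (show s + k < (l.map (·.1)).length from hmlen)]
        congr 1
        rw [List.getElem_map]; exact h1'
      have hcnt : (((l.map (·.1)).drop s).count c) = 1 + ((l.map (·.1)).drop (s+k+1)).count c := by
        conv_lhs => rw [hsplit]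
        rw [List.count_append, List.count_eq_zero.mpr htk, List.count_cons_self]
        omega
      have hgrp : pvGroup (l.drop s) c = (l[s+k]'hlen).2 :: pvGroup (l.drop (s+k+1)) c := by
        have hsplit2 : l.drop s = (l.drop s).take k ++ ((l[s+k]'hlen) :: l.drop (s+k+1)) := by
          conv_lhs => rw [← List.take_append_drop k (l.drop s)]
          congr 1
          rw [List.drop_drop, ← List.getElem_cons_drop (show s + k < l.length from hlen)]
        have hftk : ((l.drop s).take k).filter (fun p => p.1 == c) = [] := by
          rw [List.filter_eq_nil_iff]
          intro p hmem
          obtain ⟨i, hi, hie⟩ := List.mem_iff_getElem.mp hmem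
          have hik : i < k := by simp [List.length_take] at hi; omega
          rw [List.getElem_take, List.getElem_drop] at hie
          simp only [beq_iff_eq]
          rw [← hie]
          exact h2' i hik
        have hb : ((l[s+k]'hlen).1 == c) = true := by simp [h1']
        rw [pvGroup, hsplit2, List.filter_append, hftk, List.nil_append, List.filter_cons]
        simp only [hb, if_true, List.map_cons]
        simp only [pvGroup]
      have harith : ((s:Nat):Int) + (k:Int) = ((s+k+1 : Nat) : Int) - 1 := by push_cast; ring
      rw [harith, ih (s+k+1) (by omega)]
      rw [List.map_append]
      have hget : ((PySem.List.pyGet? (l.map (·.2)) ((s : Int) + (k : Int))).getD "") = (l[s+k]'hlen).2 := by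
        have hc2 : (s : Int) + (k : Int) = ((s + k : Nat) : Int) := by push_cast; ring
        rw [hc2, PySem.List.pyGet?_natCast]
        simp [hlen]
      simp [hget, hgrp]


lemma getD_foldl_insert_const (v : String → List String) (cs : List String)
    (d : PySem.Dict String (List String)) (k : String) (dflt : List String) :
    (cs.foldl (fun d c => d.insert c (v c)) d).getD k dflt
      = if k ∈ cs then v k else d.getD k dflt := by
  induction cs generalizing d with
  | nil => simp
  | cons c t ih =>
    simp only [List.foldl_cons, ih, List.mem_cons]
    by_cases ht : k ∈ t
    · simp [ht]
    · by_cases hc : k = c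
      · simp [hc]
      · simp [ht, hc, PySem.Dict.getD_insert]

lemma fusion_eq_items (filo_dic : List (String × String)) (hpre : (filo_dic.map Prod.fst).Nodup) :
    fusion filo_dic = fusion_alt filo_dic := by
  classical
  set l : List (String × String) := filo_dic.map (fun p => (pvStrip p.1, p.2)) with hl
  -- A's first loop
  have hx : ∀ p ∈ filo_dic, (PySem.Dict.mk filo_dic).get? p.1 = some p.2 := by
    intro p hp
    exact PySem.Dict.get?_of_mem_items (PySem.Dict.mk filo_dic) (k := p.1) (v := p.2) (by simpa using hp) (by simpa using hpre)
  have h1 := foldA_pairs (PySem.Dict.mk filo_dic) filo_dic hx [] []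
  -- the per-contig scan computes the group of that contig
  have hgather : ∀ c : String,
      (pvListDuplicatesOf (filo_dic.map (fun p => pvStrip p.1)) c).map
          (fun i => ((PySem.List.pyGet? (filo_dic.map (·.2)) i).getD ""))
        = pvGroup l c := by
    intro c
    have hm1 : l.map (·.1) = filo_dic.map (fun p => pvStrip p.1) := by simp [hl]
    have hm2 : l.map (·.2) = filo_dic.map (·.2) := by simp [hl]
    have := listDup_map_get l c ((l.map (·.1)).length + 1) 0
      (by have := List.count_le_length (l := (l.map (·.1)).drop 0) (a := c); simp at this ⊢; omega) []
    rw [hm1, hm2] at this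
    simpa [pvListDuplicatesOf] using this
  unfold fusion fusion_alt
  simp only [h1, List.nil_append, hgather]
  -- B's loop, re-read as a loop over the stripped pairs
  have hB : filo_dic.foldl
        (fun (d : PySem.Dict String (List String)) p =>
          d.modify (pvStrip p.1) [] (fun cur => cur ++ [p.2])) PySem.Dict.empty
      = l.foldl (fun d q => d.modify q.1 [] (fun cur => cur ++ [q.2])) PySem.Dict.empty := by
    rw [hl, List.foldl_map]
  rw [hB]
  -- both dicts: same keys, same value at every key
  have hndA : ((filo_dic.map (fun p => pvStrip p.1)).foldl
      (fun d c => d.insert c (pvGroup l c)) PySem.Dict.empty).keys.Nodup :=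
    PySem.Dict.nodup_keys_foldl_insert _ _ _ PySem.Dict.nodup_keys_empty
  have hndB : (l.foldl (fun d q => d.modify q.1 [] (fun cur => cur ++ [q.2]))
      PySem.Dict.empty).keys.Nodup :=
    PySem.Dict.nodup_keys_foldl_modify_key l (fun q : String × String => q.1) []
      (fun _ q => (fun cur => cur ++ [q.2])) PySem.Dict.empty PySem.Dict.nodup_keys_empty
  rw [PySem.Dict.items_eq_map_keys _ hndA [], PySem.Dict.items_eq_map_keys _ hndB []]
  have hkA : ((filo_dic.map (fun p => pvStrip p.1)).foldl
      (fun d c => d.insert c (pvGroup l c)) PySem.Dict.empty).keys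
      = PySem.Set.ofList (l.map (·.1)) := by
    have hm : l.map (·.1) = filo_dic.map (fun p => pvStrip p.1) := by
      rw [hl, List.map_map]; rfl
    rw [hm, PySem.Dict.keys_foldl_insert]
    exact PySem.Set.update_nil_left _
  have hkB : (l.foldl (fun d q => d.modify q.1 [] (fun cur => cur ++ [q.2]))
      PySem.Dict.empty).keys = PySem.Set.ofList (l.map (·.1)) := by
    have := PySem.Dict.keys_foldl_modify_key l (fun q : String × String => q.1) []
      (fun _ q => (fun cur => cur ++ [q.2])) PySem.Dict.empty
    simp only [PySem.Dict.keys_empty] at this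
    rw [this, PySem.Set.update_nil_left]
  rw [hkA, hkB]
  apply List.map_congr_left
  intro k hkmem
  have hkcs : k ∈ l.map (·.1) := by
    simpa [PySem.Set.mem_ofList] using hkmem
  have hvA : ((filo_dic.map (fun p => pvStrip p.1)).foldl
      (fun d c => d.insert c (pvGroup l c)) PySem.Dict.empty).getD k []
      = pvGroup l k := by
    rw [getD_foldl_insert_const]
    have : k ∈ filo_dic.map (fun p => pvStrip p.1) := by
      simpa [hl] using hkcs
    simp [this]
  have hvB : (l.foldl (fun d q => d.modify q.1 [] (fun cur => cur ++ [q.2]))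
      PySem.Dict.empty).getD k [] = pvGroup l k := by
    rw [PySem.Dict.getD_foldl_modify_append]
    simp [pvGroup]
  rw [hvA, hvB]

-- ===== VERDICT (by name: the statement is the Claim_ definition above) =====
theorem fusion_spec : Claim_equal_fusion := by
  intro filo_dic _hdom hpre
  exact fusion_eq_items filo_dic hpre
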